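-- pv_equiv track=rewrite | github.com/bush-codes/nachomud | mob_ai.py | _parse_mob_action
-- ===== SOURCE A (Python) =====
-- def _parse_mob_action(raw: str) -> str:
--     """Extract action from mob's LLM response. Simpler than agent parsing."""
--     action = ""
--     for line in raw.strip().split("\n"):
--         stripped = line.strip()
--         if stripped.lower().startswith("do:"):
--             action = stripped[3:].strip()
--             break
--
--     # Fallback: last non-empty, non-think line
--     if not action:
--         for line in reversed(raw.strip().split("\n")):
--             line = line.strip()
--             if line and not line.lower().startswith("think:"):
--                 action = line
--                 break
--
--     if action.startswith("/"):
--         action = action[1:]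
--     return action
-- ===== SOURCE B (Python) =====
-- def _parse_mob_action(raw: str) -> str:
--     """Extract action from mob's LLM response. Simpler than agent parsing."""
--     do_action = None
--     last_valid = ""
--     for line in raw.strip().split("\n"):
--         s = line.strip()
--         if do_action is None and s.lower().startswith("do:"):
--             do_action = s[3:].strip()
--         if s and not s.lower().startswith("think:"):
--             last_valid = s
--     action = do_action if do_action else last_valid
--     if action.startswith("/"):
--         action = action[1:]
--     return action
-- ===== Notes on version B (the rewrite author's own statement) =====
-- stated objective: alternative
-- what changed: Replaces A's two scans (a forward break-on-first 'do:' scan plus a reversed scan for the last non-empty non-'think:' line) with a single forward pass holding both candidates (first 'do:' remainder, last valid line) and combining them afterwards.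
import Mathlib
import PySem

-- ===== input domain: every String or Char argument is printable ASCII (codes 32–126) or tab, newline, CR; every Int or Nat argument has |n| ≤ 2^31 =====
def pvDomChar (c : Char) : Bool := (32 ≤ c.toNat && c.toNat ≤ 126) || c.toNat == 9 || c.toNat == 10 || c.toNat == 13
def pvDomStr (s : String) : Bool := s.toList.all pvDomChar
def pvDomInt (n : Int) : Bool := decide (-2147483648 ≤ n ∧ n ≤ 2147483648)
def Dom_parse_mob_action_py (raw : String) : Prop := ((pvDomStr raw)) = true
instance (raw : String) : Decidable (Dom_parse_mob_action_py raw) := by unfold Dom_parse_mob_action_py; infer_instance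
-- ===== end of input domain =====

-- B replaces A's forward-then-reversed two-scan structure with a single forward pass
-- holding both candidates (first "do:" remainder, last valid line); alternative, same cost.

-- ===== PORT A =====
-- first loop of A: break at the first stripped line whose lowercase starts with "do:"
def pvA_firstDo : List String → String
  | [] => ""
  | l :: ls =>
    let stripped := PySem.Str.strip l
    if PySem.Str.startswith (PySem.Str.lower stripped) "do:" then
      PySem.Str.strip (PySem.Str.slice stripped (some 3) none)
    else pvA_firstDo ls

-- fallback loop of A: over the REVERSED lines, break at the first non-empty non-"think:" line
def pvA_fallback : List String → String
  | [] => ""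
  | l :: ls =>
    let line := PySem.Str.strip l
    if line ≠ "" ∧ ¬ PySem.Str.startswith (PySem.Str.lower line) "think:" = true then line
    else pvA_fallback ls

def parse_mob_action_py (raw : String) : String :=
  let lines := (PySem.Str.split? (PySem.Str.strip raw) "\n").getD []  -- sep "\n" ≠ "": split? is exact here
  let action := pvA_firstDo lines
  let action := if action = "" then pvA_fallback lines.reverse else action
  if PySem.Str.startswith action "/" then PySem.Str.slice action (some 1) none else action

-- ===== PORT B =====
-- single-pass step: st = (do_action : Option String, last_valid : String)
def pvB_step (st : Option String × String) (line : String) : Option String × String :=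
  let s := PySem.Str.strip line
  let d := if st.1 = none ∧ PySem.Str.startswith (PySem.Str.lower s) "do:" = true then
             some (PySem.Str.strip (PySem.Str.slice s (some 3) none))
           else st.1
  let lv := if s ≠ "" ∧ ¬ PySem.Str.startswith (PySem.Str.lower s) "think:" = true then s else st.2
  (d, lv)

def parse_mob_action_py_alt (raw : String) : String :=
  let st := ((PySem.Str.split? (PySem.Str.strip raw) "\n").getD []).foldl pvB_step (none, "")
  let action := match st.1 with
    | some a => if a = "" then st.2 else a   -- Python truthiness: empty do-remainder falls back
    | none => st.2
  if PySem.Str.startswith action "/" then PySem.Str.slice action (some 1) none else action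

-- ===== PRECONDITION & SPEC =====
def Spec_parse_mob_action_py (raw : String) (out : String) : Prop := out = parse_mob_action_py_alt raw
instance (raw : String) (out : String) : Decidable (Spec_parse_mob_action_py raw out) := by unfold Spec_parse_mob_action_py; infer_instance

-- ===== CLAIM (what is proved, stated in full; the proofs are below) =====
def Claim_equal_parse_mob_action_py : Prop := ∀ (raw : String), Dom_parse_mob_action_py raw → Spec_parse_mob_action_py raw (parse_mob_action_py raw)

-- ===== LEMMAS AND PROOFS =====

-- Option form of A's first loop
def pvFirstDo? : List String → Option String
  | [] => none
  | l :: ls =>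
    let stripped := PySem.Str.strip l
    if PySem.Str.startswith (PySem.Str.lower stripped) "do:" then
      some (PySem.Str.strip (PySem.Str.slice stripped (some 3) none))
    else pvFirstDo? ls

lemma pvA_firstDo_eq (ls : List String) : pvA_firstDo ls = (pvFirstDo? ls).getD "" := by
  induction ls with
  | nil => rfl
  | cons l ls ih =>
    simp only [pvA_firstDo, pvFirstDo?]
    split <;> simp [ih]

-- B's fold computes (first-do-remainder as Option, last valid line starting from lv0)
lemma pvB_fold_spec (ls : List String) (d0 : Option String) (lv0 : String) :
    ls.foldl pvB_step (d0, lv0) =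
      ((match d0 with | some a => some a | none => pvFirstDo? ls),
       ls.foldl (fun acc l =>
         let s := PySem.Str.strip l
         if s ≠ "" ∧ ¬ PySem.Str.startswith (PySem.Str.lower s) "think:" = true then s else acc) lv0) := by
  induction ls generalizing d0 lv0 with
  | nil => cases d0 <;> rfl
  | cons l ls ih =>
    simp only [List.foldl_cons]
    cases d0 with
    | some a =>
      have h1 : ¬ ((some a : Option String) = none ∧ PySem.Str.startswith (PySem.Str.lower (PySem.Str.strip l)) "do:" = true) := by simp
      simp only [pvB_step]
      rw [if_neg h1, ih]
    | none =>
      simp only [pvB_step, pvFirstDo?]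
      by_cases h : PySem.Str.startswith (PySem.Str.lower (PySem.Str.strip l)) "do:" = true
      · rw [if_pos (by simpa using h), if_pos h, ih]
      · rw [if_neg (by simpa using h), if_neg h, ih]

-- a line returned by the fallback loop is never empty, so "" means "not found"
lemma pvA_fallback_append (xs : List String) (l : String) :
    pvA_fallback (xs ++ [l]) =
      if pvA_fallback xs = "" then
        (let s := PySem.Str.strip l
         if s ≠ "" ∧ ¬ PySem.Str.startswith (PySem.Str.lower s) "think:" = true then s else "")
      else pvA_fallback xs := by
  induction xs with
  | nil => simp [pvA_fallback]
  | cons x xs ih =>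
    simp only [List.cons_append, pvA_fallback]
    split
    · rename_i h
      rw [if_neg (by simp [h.1])]
    · exact ih

-- B's last_valid accumulator equals A's reversed-scan fallback (with "" meaning "keep acc")
lemma pvLastV_eq_fallback (ls : List String) (acc : String) :
    ls.foldl (fun acc l =>
        let s := PySem.Str.strip l
        if s ≠ "" ∧ ¬ PySem.Str.startswith (PySem.Str.lower s) "think:" = true then s else acc) acc =
      if pvA_fallback ls.reverse = "" then acc else pvA_fallback ls.reverse := by
  induction ls generalizing acc with
  | nil => simp [pvA_fallback]
  | cons l ls ih =>
    simp only [List.foldl_cons, List.reverse_cons]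
    rw [pvA_fallback_append, ih]
    by_cases hfb : pvA_fallback ls.reverse = ""
    · rw [if_pos hfb, if_pos hfb]
      by_cases hq : PySem.Str.strip l ≠ "" ∧ ¬ PySem.Str.startswith (PySem.Str.lower (PySem.Str.strip l)) "think:" = true
      · rw [if_pos hq, if_pos hq, if_neg (by simp [hq.1])]
      · rw [if_neg hq, if_neg hq, if_pos rfl]
    · rw [if_neg hfb, if_neg hfb, if_neg hfb]

-- ===== VERDICT (by name: the statement is the Claim_ definition above) =====
theorem parse_mob_action_py_spec : Claim_equal_parse_mob_action_py := by
  intro raw _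
  unfold Spec_parse_mob_action_py parse_mob_action_py parse_mob_action_py_alt
  dsimp only
  generalize ((PySem.Str.split? (PySem.Str.strip raw) "\n").getD []) = lines
  rw [pvB_fold_spec, pvA_firstDo_eq, pvLastV_eq_fallback]
  cases h : pvFirstDo? lines with
  | none => by_cases hfb : pvA_fallback lines.reverse = "" <;> simp [hfb]
  | some a =>
    by_cases ha : a = "" <;>
      by_cases hfb : pvA_fallback lines.reverse = "" <;> simp [ha, hfb]
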